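-- pv_equiv track=rewrite | github.com/angelsen/tap-tools | packages/termtap/src/termtap/filters.py | collapse_empty_lines
-- ===== SOURCE A (Python) =====
-- def collapse_empty_lines(content: str, threshold: int = 5) -> str:
--     """Collapse consecutive empty lines above threshold.
--
--     Args:
--         content: The text content to filter
--         threshold: Number of consecutive empty lines before collapsing
--
--     Returns:
--         Content with collapsed empty lines
--     """
--     if not content:
--         return content
--
--     lines = content.splitlines()
--     if not lines:
--         return content
--
--     result = []
--     empty_count = 0
--
--     for line in lines:
--         if not line.strip():  # Empty line
--             empty_count += 1
--         else:
--             # Handle accumulated empty lines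
--             if empty_count > 0:
--                 if empty_count > threshold:
--                     # Collapse: keep one empty line, add message, keep one more
--                     result.append("")  # One empty line before
--                     omitted = empty_count - 2  # We're keeping 2
--                     if omitted > 0:
--                         result.append(f"... {omitted} empty lines omitted ...")
--                     result.append("")  # One empty line after
--                 else:
--                     # Keep all empty lines if below threshold
--                     result.extend([""] * empty_count)
--                 empty_count = 0
--
--             # Add the non-empty line
--             result.append(line)
--
--     # Handle trailing empty lines
--     if empty_count > 0:
--         if empty_count > threshold:
--             result.append("")  # One empty line
--             omitted = empty_count - 1
--             if omitted > 0:
--                 result.append(f"... {omitted} empty lines omitted ...")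
--         else:
--             result.extend([""] * empty_count)
--
--     # Preserve the original ending (newline or not)
--     if content.endswith("\n"):
--         return "\n".join(result) + "\n"
--     else:
--         return "\n".join(result)
-- ===== SOURCE B (Python) =====
-- from itertools import groupby
--
--
-- def collapse_empty_lines(content: str, threshold: int = 5) -> str:
--     """Collapse consecutive empty lines above threshold (groupby formulation)."""
--     if not content:
--         return content
--
--     lines = content.splitlines()
--     if not lines:
--         return content
--
--     groups = [(key, list(grp)) for key, grp in groupby(lines, key=lambda l: not l.strip())]
--
--     out = []
--     last = len(groups) - 1
--     for i, (is_empty, grp) in enumerate(groups):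
--         if not is_empty:
--             out.extend(grp)
--         else:
--             n = len(grp)
--             if n <= threshold:
--                 out.extend([""] * n)
--             elif i == last:
--                 out.append("")
--                 if n - 1 > 0:
--                     out.append(f"... {n - 1} empty lines omitted ...")
--             else:
--                 out.append("")
--                 if n - 2 > 0:
--                     out.append(f"... {n - 2} empty lines omitted ...")
--                 out.append("")
--
--     return "\n".join(out) + ("\n" if content.endswith("\n") else "")
-- ===== Notes on version B (the rewrite author's own statement) =====
-- stated objective: idiomatic
-- what changed: Replaces the stateful counter loop (accumulate empty_count, flush on each non-empty line, separate trailing flush) with an itertools.groupby pass that forms empty/non-empty runs up front and emits each run in one place, distinguishing the final run by its index.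
import Mathlib
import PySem

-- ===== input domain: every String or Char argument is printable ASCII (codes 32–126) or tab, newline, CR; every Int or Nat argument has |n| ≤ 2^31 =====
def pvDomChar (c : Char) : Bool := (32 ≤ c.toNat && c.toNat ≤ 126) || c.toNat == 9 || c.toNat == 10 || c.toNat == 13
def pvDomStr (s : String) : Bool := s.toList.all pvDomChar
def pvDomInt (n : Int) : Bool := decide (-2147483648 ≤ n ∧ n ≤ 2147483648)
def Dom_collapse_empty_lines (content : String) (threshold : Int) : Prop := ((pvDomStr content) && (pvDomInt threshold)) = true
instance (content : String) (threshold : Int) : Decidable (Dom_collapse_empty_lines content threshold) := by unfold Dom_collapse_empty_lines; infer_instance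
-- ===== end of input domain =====

-- B replaces A's stateful empty-line counter loop by a groupby-into-runs pass (idiomatic decomposition; same cost).

-- ===== PORT A =====
-- shared with B: 'not line.strip()' and the f-string message (identical text in both sources)
def pvEmpty (line : String) : Bool := PySem.Str.strip line == ""
def pvMsg (n : Int) : String := "... " ++ PySem.Int.toStr n ++ " empty lines omitted ..."

-- the 'if empty_count > 0' flush block inside A's loop (interior shape)
def pvFlushA (threshold : Int) (res : List String) (c : Int) : List String :=
  if c > 0 then
    if c > threshold then
      (res ++ [""]) ++ (if c - 2 > 0 then [pvMsg (c - 2)] else []) ++ [""]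
    else
      res ++ List.replicate c.toNat ""   -- c is a count, always ≥ 0, so toNat is exact
  else res

-- A's loop body
def pvStepA (threshold : Int) (st : List String × Int) (line : String) : List String × Int :=
  if pvEmpty line then (st.1, st.2 + 1)
  else (pvFlushA threshold st.1 st.2 ++ [line], 0)

-- A's trailing 'if empty_count > 0' block after the loop
def pvTrailA (threshold : Int) (res : List String) (c : Int) : List String :=
  if c > 0 then
    if c > threshold then
      (res ++ [""]) ++ (if c - 1 > 0 then [pvMsg (c - 1)] else [])
    else
      res ++ List.replicate c.toNat ""
  else res

def collapse_empty_lines (content : String) (threshold : Int) : String :=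
  if content == "" then content
  else
    let lines := PySem.Str.splitlines content
    if lines == [] then content
    else
      let st := lines.foldl (pvStepA threshold) ([], 0)
      let result := pvTrailA threshold st.1 st.2
      if PySem.Str.endswith content "\n" then PySem.Str.join "\n" result ++ "\n"
      else PySem.Str.join "\n" result

-- ===== PORT B =====
-- itertools.groupby(lines, key=lambda l: not l.strip()) materialised into (key, run) pairs
def pvRuns (lines : List String) : List (Bool × List String) :=
  match lines with
  | [] => []
  | x :: rest =>
    (pvEmpty x, x :: rest.takeWhile (fun l => pvEmpty l == pvEmpty x)) ::
      pvRuns (rest.dropWhile (fun l => pvEmpty l == pvEmpty x))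
termination_by lines.length
decreasing_by
  simp only [List.length_cons]
  exact Nat.lt_succ_of_le (List.length_dropWhile_le _ _)

-- body of B's loop for one group; isLast = (i == last)
def pvEmitGroup (threshold : Int) (isEmpty : Bool) (grp : List String) (isLast : Bool) : List String :=
  if isEmpty = false then grp
  else if (grp.length : Int) ≤ threshold then List.replicate grp.length ""
  else if isLast then
    "" :: (if (grp.length : Int) - 1 > 0 then [pvMsg ((grp.length : Int) - 1)] else [])
  else
    "" :: ((if (grp.length : Int) - 2 > 0 then [pvMsg ((grp.length : Int) - 2)] else []) ++ [""])

-- B's enumerate loop over the groups ('i == last' becomes 'rest is empty')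
def pvEmit (threshold : Int) : List (Bool × List String) → List String
  | [] => []
  | g :: rest => pvEmitGroup threshold g.1 g.2 rest.isEmpty ++ pvEmit threshold rest

def collapse_empty_lines_alt (content : String) (threshold : Int) : String :=
  if content == "" then content
  else
    let lines := PySem.Str.splitlines content
    if lines == [] then content
    else
      PySem.Str.join "\n" (pvEmit threshold (pvRuns lines)) ++
        (if PySem.Str.endswith content "\n" then "\n" else "")

-- ===== PRECONDITION & SPEC =====
def Spec_collapse_empty_lines (content : String) (threshold : Int) (out : String) : Prop := out = collapse_empty_lines_alt content threshold
instance (content : String) (threshold : Int) (out : String) : Decidable (Spec_collapse_empty_lines content threshold out) := by unfold Spec_collapse_empty_lines; infer_instance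

-- ===== CLAIM (what is proved, stated in full; the proofs are below) =====
def Claim_equal_collapse_empty_lines : Prop := ∀ (content : String) (threshold : Int), Dom_collapse_empty_lines content threshold → Spec_collapse_empty_lines content threshold (collapse_empty_lines content threshold)

-- ===== LEMMAS AND PROOFS =====

theorem pvRuns_nil : pvRuns [] = [] := by rw [pvRuns]

theorem pvRuns_cons (x : String) (rest : List String) :
    pvRuns (x :: rest) =
      (pvEmpty x, x :: rest.takeWhile (fun l => pvEmpty l == pvEmpty x)) ::
        pvRuns (rest.dropWhile (fun l => pvEmpty l == pvEmpty x)) := by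
  rw [pvRuns]

theorem pvFlushA_zero (th : Int) (res : List String) : pvFlushA th res 0 = res := by
  simp [pvFlushA]

theorem pvTrailA_zero (th : Int) (res : List String) : pvTrailA th res 0 = res := by
  simp [pvTrailA]

theorem pvFlushA_split (th : Int) (res : List String) (c : Int) :
    pvFlushA th res c = res ++ pvFlushA th [] c := by
  unfold pvFlushA; split_ifs <;> simp

theorem pvTrailA_split (th : Int) (res : List String) (c : Int) :
    pvTrailA th res c = res ++ pvTrailA th [] c := by
  unfold pvTrailA; split_ifs <;> simp

theorem pvFold_empty (th : Int) (e : List String) (h : ∀ l ∈ e, pvEmpty l = true) :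
    ∀ (res : List String) (c : Int),
      e.foldl (pvStepA th) (res, c) = (res, c + e.length) := by
  induction e with
  | nil => intro res c; simp
  | cons z e' ih =>
    intro res c
    have hz : pvEmpty z = true := h z (by simp)
    simp only [List.foldl_cons, pvStepA, hz, if_pos]
    rw [ih (fun l hl => h l (by simp [hl]))]
    simp only [List.length_cons]
    congr 1
    push_cast
    ring

theorem pvFold_nonempty0 (th : Int) (e : List String) (h : ∀ l ∈ e, pvEmpty l = false) :
    ∀ res : List String, e.foldl (pvStepA th) (res, 0) = (res ++ e, 0) := by
  induction e with
  | nil => intro res; simp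
  | cons z e' ih =>
    intro res
    have hz : pvEmpty z = false := h z (by simp)
    simp only [List.foldl_cons, pvStepA, hz, Bool.false_eq_true, if_false, pvFlushA_zero]
    rw [ih (fun l hl => h l (by simp [hl]))]
    simp

theorem pvFold_nonempty (th : Int) (e : List String) (he : e ≠ [])
    (h : ∀ l ∈ e, pvEmpty l = false) (res : List String) (c : Int) :
    e.foldl (pvStepA th) (res, c) = (pvFlushA th res c ++ e, 0) := by
  cases e with
  | nil => exact absurd rfl he
  | cons z e' =>
    have hz : pvEmpty z = false := h z (by simp)
    simp only [List.foldl_cons, pvStepA, hz, Bool.false_eq_true, if_false]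
    rw [pvFold_nonempty0 th e' (fun l hl => h l (by simp [hl]))]
    simp

theorem pvFlush_emit_interior (th : Int) (grp : List String) (hg : grp ≠ []) :
    pvFlushA th [] (grp.length : Int) = pvEmitGroup th true grp false := by
  have hlen : 1 ≤ grp.length := List.length_pos_iff.mpr hg
  have h0 : (0 : Int) < (grp.length : Int) := by exact_mod_cast hlen
  unfold pvFlushA pvEmitGroup
  split_ifs <;> simp_all <;> omega

theorem pvTrail_emit (th : Int) (grp : List String) (hg : grp ≠ []) :
    pvTrailA th [] (grp.length : Int) = pvEmitGroup th true grp true := by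
  have hlen : 1 ≤ grp.length := List.length_pos_iff.mpr hg
  have h0 : (0 : Int) < (grp.length : Int) := by exact_mod_cast hlen
  unfold pvTrailA pvEmitGroup
  split_ifs <;> simp_all <;> omega

theorem pvEmitGroup_false (th : Int) (grp : List String) (b : Bool) :
    pvEmitGroup th false grp b = grp := by
  simp [pvEmitGroup]

theorem pvDropWhile_head_false (p : String → Bool) (l : List String) (y : String) (t : List String)
    (h : l.dropWhile p = y :: t) : p y = false := by
  have hne : l.dropWhile p ≠ [] := by simp [h]
  have := List.head_dropWhile_not (p := p) (l := l) hne
  simpa [h] using this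

theorem pvMain (th : Int) : ∀ (fuel : Nat) (lines : List String), lines.length ≤ fuel →
    ∀ res : List String,
      pvTrailA th (lines.foldl (pvStepA th) (res, 0)).1 (lines.foldl (pvStepA th) (res, 0)).2
        = res ++ pvEmit th (pvRuns lines) := by
  intro fuel
  induction fuel with
  | zero =>
    intro lines hlen res
    have hnil : lines = [] := List.length_eq_zero_iff.mp (Nat.le_zero.mp hlen)
    subst hnil
    simp [pvRuns_nil, pvEmit, pvTrailA_zero]
  | succ n ih =>
    intro lines hlen res
    cases hl : lines with
    | nil => simp [pvRuns_nil, pvEmit, pvTrailA_zero]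
    | cons x rest =>
      subst hl
      have hrunmem : ∀ l ∈ x :: rest.takeWhile (fun l => pvEmpty l == pvEmpty x),
          pvEmpty l = pvEmpty x := by
        intro l hlmem
        rcases List.mem_cons.mp hlmem with rfl | hlm
        · rfl
        · simpa using List.mem_takeWhile_imp hlm
      have hrunne : (x :: rest.takeWhile (fun l => pvEmpty l == pvEmpty x)) ≠ [] := by simp
      have hlines : x :: rest = (x :: rest.takeWhile (fun l => pvEmpty l == pvEmpty x))
          ++ rest.dropWhile (fun l => pvEmpty l == pvEmpty x) := by
        rw [List.cons_append]
        congr 1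
        exact (List.takeWhile_append_dropWhile).symm
      have hruns_eq := pvRuns_cons x rest
      have htdlen : (rest.takeWhile (fun l => pvEmpty l == pvEmpty x)).length
          + (rest.dropWhile (fun l => pvEmpty l == pvEmpty x)).length = rest.length := by
        have h := congrArg List.length
          (List.takeWhile_append_dropWhile (p := fun l => pvEmpty l == pvEmpty x) (l := rest))
        rw [List.length_append] at h
        exact h
      simp only [List.length_cons] at hlen
      cases hk : pvEmpty x with
      | false =>
        have hallf : ∀ l ∈ x :: rest.takeWhile (fun l => pvEmpty l == pvEmpty x),
            pvEmpty l = false := fun l hl => (hrunmem l hl).trans hk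
        rw [hruns_eq, hlines, List.foldl_append, pvFold_nonempty0 th _ hallf res]
        have hdw' : (rest.dropWhile (fun l => pvEmpty l == pvEmpty x)).length ≤ n := by omega
        rw [ih _ hdw' _]
        simp [pvEmit, pvEmitGroup_false, hk]
      | true =>
        have hallt : ∀ l ∈ x :: rest.takeWhile (fun l => pvEmpty l == pvEmpty x),
            pvEmpty l = true := fun l hl => (hrunmem l hl).trans hk
        rw [hruns_eq, hlines, List.foldl_append, pvFold_empty th _ hallt res 0]
        cases hdw : rest.dropWhile (fun l => pvEmpty l == pvEmpty x) with
        | nil =>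
          simp only [List.foldl_nil, zero_add]
          rw [pvTrailA_split, pvTrail_emit th _ hrunne]
          simp [pvEmit, pvRuns_nil, hk]
        | cons y t =>
          have hy : pvEmpty y = false := by
            have hpy := pvDropWhile_head_false _ rest y t hdw
            simp only [hk] at hpy
            simpa using hpy
          rw [pvRuns_cons y t, hy]
          have hrun2mem : ∀ l ∈ y :: t.takeWhile (fun l => pvEmpty l == false),
              pvEmpty l = false := by
            intro l hlmem
            rcases List.mem_cons.mp hlmem with rfl | hlm
            · exact hy
            · simpa using List.mem_takeWhile_imp hlm
          have hsplit2 : y :: t = (y :: t.takeWhile (fun l => pvEmpty l == false))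
              ++ t.dropWhile (fun l => pvEmpty l == false) := by
            rw [List.cons_append]
            congr 1
            exact (List.takeWhile_append_dropWhile).symm
          rw [hsplit2, List.foldl_append,
            pvFold_nonempty th _ (by simp) hrun2mem res _]
          have hdwlen : (rest.dropWhile (fun l => pvEmpty l == pvEmpty x)).length
              = t.length + 1 := by rw [hdw]; simp
          have hdrlen : (t.dropWhile (fun l => pvEmpty l == false)).length ≤ n := by
            have h1 := List.length_dropWhile_le (fun l => pvEmpty l == false) t
            omega
          rw [ih _ hdrlen _]
          simp only [pvEmit, List.isEmpty_cons, pvEmitGroup_false]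
          rw [pvFlushA_split, zero_add, pvFlush_emit_interior th _ hrunne]
          simp [hk]

-- ===== VERDICT (by name: the statement is the Claim_ definition above) =====
theorem collapse_empty_lines_spec : Claim_equal_collapse_empty_lines := by
  intro content threshold _
  unfold Spec_collapse_empty_lines collapse_empty_lines collapse_empty_lines_alt
  by_cases h0 : content == ""
  · simp [h0]
  · simp only [h0, Bool.false_eq_true, if_false]
    by_cases h1 : PySem.Str.splitlines content == []
    · simp [h1]
    · simp only [h1, Bool.false_eq_true, if_false]
      have hm := pvMain threshold (PySem.Str.splitlines content).length
        (PySem.Str.splitlines content) le_rfl []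
      rw [List.nil_append] at hm
      rw [hm]
      split_ifs <;> simp
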